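-- pv_equiv track=rewrite | github.com/thealper2/codewars-solutions | 7-kyu/multiples_and_digit_sums.py | procedure
-- ===== SOURCE A (Python) =====
-- def procedure(i):
--     multiples = [num for num in range(0, 101, i)]
--     total = 0
--     for num in multiples:
--         num_sum = 0
--         i = 0
--         while 10**i <= num:
--             d = num // 10**i % 10
--             num_sum += d
--             i += 1
--
--         total += num_sum
--
--     return total
-- ===== SOURCE B (Python) =====
-- def procedure(i):
--     # digit sums via the decimal string representation, one flat generator
--     return sum(int(ch) for num in range(0, 101, i) for ch in str(num))
-- ===== Notes on version B (the rewrite author's own statement) =====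
-- stated objective: idiomatic
-- what changed: B computes each digit sum by traversing the decimal string representation of the multiple inside one flat generator expression, replacing A's list materialisation and positional power-of-ten while loop with mod/div arithmetic.
import Mathlib
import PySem

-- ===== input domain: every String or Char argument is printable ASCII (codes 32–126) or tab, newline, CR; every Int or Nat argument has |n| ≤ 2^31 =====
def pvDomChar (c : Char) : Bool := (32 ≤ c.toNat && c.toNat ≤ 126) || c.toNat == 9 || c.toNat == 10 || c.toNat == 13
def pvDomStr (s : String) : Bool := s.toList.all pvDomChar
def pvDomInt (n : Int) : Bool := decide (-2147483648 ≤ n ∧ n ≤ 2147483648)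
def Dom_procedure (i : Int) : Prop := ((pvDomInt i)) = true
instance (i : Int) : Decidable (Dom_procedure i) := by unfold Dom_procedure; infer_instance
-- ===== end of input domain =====

-- B computes digit sums by traversing the decimal string representation in one flat
-- generator instead of A's positional power-of-ten while loop (idiomatic rewrite, same cost).


-- ===== PORT A =====
-- the 'while 10**i <= num' loop; fuel only makes the recursion structural (64 is plenty:
-- 10^j exceeds any |num| ≤ 2^31 long before j = 64, and the loop runs only for num ≥ 1)
def pvWhileA (fuel : Nat) (num : Int) (j : Nat) (numSum : Int) : Int :=
  match fuel with
  | 0 => numSum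
  | fuel + 1 =>
    if (10 : Int) ^ j ≤ num then
      pvWhileA fuel num (j + 1) (numSum + PySem.Int.mod (PySem.Int.floordiv num ((10 : Int) ^ j)) 10)
    else numSum

def procedure (i : Int) : Int :=
  -- multiples = [num for num in range(0, 101, i)]; then total accumulated over it
  (PySem.List.pyRange 0 101 i).foldl (fun total num => total + pvWhileA 64 num 0 0) 0

-- ===== PORT B =====
-- int(ch) for a single decimal digit character; exact here: every num produced by
-- range(0, 101, i) is nonnegative, so str(num) consists of digit characters only
def pvDigitsB (num : Int) : List Int :=
  (PySem.Int.toChars num).map (fun c => (c.toNat : Int) - 48)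

def procedure_alt (i : Int) : Int :=
  ((PySem.List.pyRange 0 101 i).flatMap pvDigitsB).sum

-- ===== PRECONDITION & SPEC =====
-- range(0, 101, 0) raises ValueError in Python (both A and B), hence i = 0 is excluded
def Pre_procedure (i : Int) : Prop := i ≠ 0
instance (i : Int) : Decidable (Pre_procedure i) := by unfold Pre_procedure; infer_instance
def pvWitness_procedure : Int := (7)

def Spec_procedure (i : Int) (out : Int) : Prop := out = procedure_alt i
instance (i : Int) (out : Int) : Decidable (Spec_procedure i out) := by unfold Spec_procedure; infer_instance

-- ===== CLAIM (what is proved, stated in full; the proofs are below) =====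
def Claim_equal_procedure : Prop := ∀ (i : Int), Dom_procedure i → Pre_procedure i → Spec_procedure i (procedure i)

-- ===== LEMMAS AND PROOFS =====

-- the per-multiple agreement, checked for all 101 possible multiples at once
theorem pv_key : ∀ x ∈ PySem.List.pyRange 0 101 1, pvWhileA 64 x 0 0 = (pvDigitsB x).sum := by
  decide

theorem pv_range_neg (i : Int) (h : i < 0) : PySem.List.pyRange 0 101 i = [] := by
  unfold PySem.List.pyRange
  have h0 : ¬ (i = 0) := by omega
  have h1 : ¬ (0 < i) := by omega
  have h2 : ¬ ((101 : Int) < 0) := by omega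
  simp [h0, h1, h2]

theorem pv_elem (i : Int) (hi : i ≠ 0) :
    ∀ x ∈ PySem.List.pyRange 0 101 i, pvWhileA 64 x 0 0 = (pvDigitsB x).sum := by
  intro x hx
  rcases lt_or_gt_of_ne hi with hneg | hpos
  · rw [pv_range_neg i hneg] at hx; cases hx
  · have hb := (PySem.List.mem_pyRange_iff_of_pos hpos x).1 hx
    exact pv_key x ((PySem.List.mem_pyRange_one).2 ⟨hb.1, hb.2.1⟩)

-- ===== VERDICT (by name: the statement is the Claim_ definition above) =====
theorem procedure_spec : Claim_equal_procedure := by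
  intro i _ hi
  unfold Spec_procedure procedure procedure_alt
  rw [PySem.List.foldl_add, List.flatMap_def, List.sum_flatten]
  have := List.map_congr_left (l := PySem.List.pyRange 0 101 i)
    (f := fun num => pvWhileA 64 num 0 0) (g := fun num => (pvDigitsB num).sum)
    (fun x hx => pv_elem i hi x hx)
  rw [this]
  simp [List.map_map, Function.comp_def]
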